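-- pv_equiv track=rewrite | github.com/chirag1992m/heuristicProblemSolvingFall17 | week8-compatibility/bot/game_client.py | is_incomparable
-- ===== SOURCE A (Python) =====
-- def is_incomparable(config1, config2):
--     small, big = False, False
--     for x1, x2 in zip(config1, config2):
--         if x1 < x2:
--             small = True
--         if x1 > x2:
--             big = True
--     return big and small
-- ===== SOURCE B (Python) =====
-- def is_incomparable(config1, config2):
--     diffs = [a - b for a, b in zip(config1, config2)]
--     return bool(diffs) and min(diffs) < 0 < max(diffs)
-- ===== Notes on version B (the rewrite author's own statement) =====
-- stated objective: alternative
-- what changed: Instead of maintaining two boolean flags over the pairs, B reduces the pairwise differences to their numeric extremes and decides incomparability by the sign test min(diffs) < 0 < max(diffs).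
import Mathlib
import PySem

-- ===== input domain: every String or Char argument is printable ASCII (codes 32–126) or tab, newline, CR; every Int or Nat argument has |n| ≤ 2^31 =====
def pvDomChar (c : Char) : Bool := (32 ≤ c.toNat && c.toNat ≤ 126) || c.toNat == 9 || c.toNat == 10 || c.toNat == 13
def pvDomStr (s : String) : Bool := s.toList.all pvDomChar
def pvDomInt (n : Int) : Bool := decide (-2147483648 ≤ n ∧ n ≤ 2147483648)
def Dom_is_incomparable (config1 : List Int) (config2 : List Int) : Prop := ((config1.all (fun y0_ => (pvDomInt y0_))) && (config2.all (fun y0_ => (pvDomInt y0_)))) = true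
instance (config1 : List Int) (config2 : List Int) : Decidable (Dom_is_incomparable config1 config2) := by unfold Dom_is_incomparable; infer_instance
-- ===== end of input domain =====

-- B replaces A's two-flag loop by a numeric reduction: it builds the list of pairwise
-- differences and decides incomparability by the sign test min(diffs) < 0 < max(diffs).

-- ===== PORT A =====
-- literal port of A: one fold over zip maintaining the (small, big) flag pair
def is_incomparable (config1 : List Int) (config2 : List Int) : Bool :=
  let sb := (config1.zip config2).foldl
    (fun (acc : Bool × Bool) (p : Int × Int) =>
      let acc1 := if p.1 < p.2 then (true, acc.2) else acc
      if p.1 > p.2 then (acc1.1, true) else acc1)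
    (false, false)
  sb.2 && sb.1

-- ===== PORT B =====
-- port of Source B: diffs = [a-b for pairs]; bool(diffs) and min(diffs) < 0 < max(diffs)
def is_incomparable_alt (config1 : List Int) (config2 : List Int) : Bool :=
  let diffs := (config1.zip config2).map (fun p => p.1 - p.2)
  !diffs.isEmpty &&
    (match PySem.List.min? diffs (fun x => x), PySem.List.max? diffs (fun x => x) with
     | some m, some M => decide (m < 0) && decide (0 < M)
     | _, _ => false)

-- ===== PRECONDITION & SPEC =====
def Spec_is_incomparable (config1 : List Int) (config2 : List Int) (out : Bool) : Prop := out = is_incomparable_alt config1 config2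
instance (config1 : List Int) (config2 : List Int) (out : Bool) : Decidable (Spec_is_incomparable config1 config2 out) := by unfold Spec_is_incomparable; infer_instance

-- ===== CLAIM =====
def Claim_equal_is_incomparable : Prop := ∀ (config1 : List Int) (config2 : List Int), Dom_is_incomparable config1 config2 → Spec_is_incomparable config1 config2 (is_incomparable config1 config2)

-- ===== LEMMAS AND PROOFS =====

-- invariant of A's fold: the flags are the initial flags OR-ed with existence scans
theorem pv_fold_inv (l : List (Int × Int)) (s b : Bool) :
    l.foldl
      (fun (acc : Bool × Bool) (p : Int × Int) =>
        let acc1 := if p.1 < p.2 then (true, acc.2) else acc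
        if p.1 > p.2 then (acc1.1, true) else acc1)
      (s, b)
    = (s || l.any (fun p => decide (p.1 < p.2)), b || l.any (fun p => decide (p.1 > p.2))) := by
  induction l generalizing s b with
  | nil => simp
  | cons p t ih =>
    simp only [List.foldl_cons, List.any_cons]
    by_cases h1 : p.1 < p.2 <;> by_cases h2 : p.1 > p.2 <;>
      simp [h1, h2, ih]

-- the minimum is negative iff some element is negative
theorem pv_min_neg (l : List Int) (m : Int) (h : PySem.List.min? l (fun x => x) = some m) :
    (decide (m < 0)) = l.any (fun x => decide (x < 0)) := by
  have hm := PySem.List.min?_mem h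
  have hmin := PySem.List.min?_isMin h
  by_cases hneg : m < 0
  · have hany : l.any (fun x => decide (x < 0)) = true :=
      List.any_eq_true.mpr ⟨m, hm, by simpa using hneg⟩
    simp [hneg, hany]
  · have hany : l.any (fun x => decide (x < 0)) = false := by
      simp only [List.any_eq_false, decide_eq_true_eq]
      intro x hx
      have := hmin x hx
      omega
    simp [hneg, hany]

-- the maximum is positive iff some element is positive
theorem pv_max_pos (l : List Int) (M : Int) (h : PySem.List.max? l (fun x => x) = some M) :
    (decide (0 < M)) = l.any (fun x => decide (0 < x)) := by
  have hM := PySem.List.max?_mem h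
  have hmax := PySem.List.max?_isMax h
  by_cases hpos : 0 < M
  · have hany : l.any (fun x => decide (0 < x)) = true :=
      List.any_eq_true.mpr ⟨M, hM, by simpa using hpos⟩
    simp [hpos, hany]
  · have hany : l.any (fun x => decide (0 < x)) = false := by
      simp only [List.any_eq_false, decide_eq_true_eq]
      intro x hx
      have := hmax x hx
      omega
    simp [hpos, hany]

-- ===== VERDICT =====
theorem is_incomparable_spec : Claim_equal_is_incomparable := by
  intro config1 config2 _
  unfold Spec_is_incomparable is_incomparable is_incomparable_alt
  simp only [pv_fold_inv, Bool.false_or]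
  rcases hz : config1.zip config2 with _ | ⟨p, t⟩
  · simp
  · set l := ((p :: t).map (fun q : Int × Int => q.1 - q.2)) with hl
    have hne : l ≠ [] := by simp [hl]
    rcases hmin : PySem.List.min? l (fun x => x) with _ | m
    · rw [PySem.List.min?_eq_none_iff] at hmin
      exact absurd hmin hne
    rcases hmax : PySem.List.max? l (fun x => x) with _ | M
    · rw [PySem.List.max?_eq_none_iff] at hmax
      exact absurd hmax hne
    simp only [hl]
    rw [pv_min_neg _ _ hmin, pv_max_pos _ _ hmax]
    simp only [hl, List.any_map, Function.comp_def]
    have e1 : ∀ q : Int × Int, decide (q.1 - q.2 < 0) = decide (q.1 < q.2) := by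
      intro q; by_cases h : q.1 < q.2 <;> simp [h]
    have e2 : ∀ q : Int × Int, decide (0 < q.1 - q.2) = decide (q.2 < q.1) := by
      intro q; by_cases h : q.2 < q.1 <;> simp [h]
    simp only [e1, e2, Bool.and_comm]
    simp
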